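-- pv_equiv track=rewrite | github.com/RedBlueThing/advent-of-code-2021 | day-five.py | draw_vent_line_part_two
-- ===== SOURCE A (Python) =====
-- def seafloor_pixel_index(x, y, seafloor_width, seafloor_height):
--     return (seafloor_width * y) + x
--
-- def update_seafloor_pixel(seafloor, x, y, seafloor_width, seafloor_height):
--     pixel_index = seafloor_pixel_index(x, y, seafloor_width, seafloor_height)
--     assert pixel_index >= 0 and pixel_index < seafloor_width * seafloor_height, "Index was %d, x:%d, y%d" % (
--         pixel_index, x, y)
--
--     # just add one to the seafloor "pixel" at the location
--     seafloor[pixel_index] += 1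
--
--     return seafloor
--
-- def draw_vent_line_part_one(seafloor, x1, y1, x2, y2, seafloor_width, seafloor_height):
--
--     # for now ignore zero gradient lines
--     if (x1 != x2 and y1 != y2):
--         return seafloor
--
--     if (x1 == x2):
--         for y in range(min(y1, y2), max(y1, y2) + 1):
--             seafloor = update_seafloor_pixel(seafloor, x2, y, seafloor_width, seafloor_height)
--     if (y1 == y2):
--         for x in range(min(x1, x2), max(x1, x2) + 1):
--             seafloor = update_seafloor_pixel(seafloor, x, y2, seafloor_width, seafloor_height)
--
--     return seafloor
--
-- def draw_vent_line_part_two(seafloor, x1, y1, x2, y2, seafloor_width, seafloor_height):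
--
--     if (x1 == x2 or y1 == y2):
--         return draw_vent_line_part_one(seafloor, x1, y1, x2, y2, seafloor_width, seafloor_height)
--
--     rise = (y2 - y1)
--     run = (x2 - x1)
--
--     current_x = x1
--     current_y = y1
--
--     def offset(value):
--         if not value:
--             return 0
--         return int(value / abs(value))
--
--     while (current_x != x2 and current_y != y2):
--         seafloor = update_seafloor_pixel(seafloor, current_x, current_y, seafloor_width, seafloor_height)
--         current_x += offset(run)
--         current_y += offset(rise)
--     seafloor = update_seafloor_pixel(seafloor, current_x, current_y, seafloor_width, seafloor_height)
--
--     return seafloor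
-- ===== SOURCE B (Python) =====
-- def draw_vent_line_part_two(seafloor, x1, y1, x2, y2, seafloor_width, seafloor_height):
--     # Tally-then-rebuild: collect the line's covered cell indices into a dict of
--     # counts, then rebuild the whole grid in one comprehension adding each cell's
--     # tally.  (Returns a fresh list; A updates `seafloor` in place.)
--     if x1 == x2:
--         dx, dy, n = 0, (1 if y1 <= y2 else -1), abs(y2 - y1)
--     elif y1 == y2:
--         dx, dy, n = (1 if x1 <= x2 else -1), 0, abs(x2 - x1)
--     else:
--         dx = 1 if x1 < x2 else -1
--         dy = 1 if y1 < y2 else -1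
--         n = min(abs(x2 - x1), abs(y2 - y1))
--     counts = {}
--     for i in range(n + 1):
--         idx = seafloor_width * (y1 + i * dy) + (x1 + i * dx)
--         assert 0 <= idx < seafloor_width * seafloor_height
--         counts[idx] = counts.get(idx, 0) + 1
--     return [v + counts.get(i, 0) for i, v in enumerate(seafloor)]
-- ===== Notes on version B (the rewrite author's own statement) =====
-- stated objective: alternative
-- what changed: B replaces A's in-place pointer walk (delegation to two part-one for-loops plus a while-loop with two running pointers and a trailing extra update) by a tally-then-rebuild scheme: it counts the line's covered cell indices in a dict and then rebuilds the whole grid in one enumerate comprehension adding each cell's tally; note B returns a fresh list while A mutates seafloor in place (the claim is about the return value).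
-- intended difference: On degenerate lines with x1==x2 and y1==y2 A runs both part-one loops and increments the single pixel twice, while B tallies the one covered cell once; a zero-length vent line plainly covers its point exactly once, so B's value is the intended one. — e.g. on draw_vent_line_part_two([0], 0, 0, 0, 0, 1, 1): A returns [2], B returns [1]
import Mathlib
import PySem

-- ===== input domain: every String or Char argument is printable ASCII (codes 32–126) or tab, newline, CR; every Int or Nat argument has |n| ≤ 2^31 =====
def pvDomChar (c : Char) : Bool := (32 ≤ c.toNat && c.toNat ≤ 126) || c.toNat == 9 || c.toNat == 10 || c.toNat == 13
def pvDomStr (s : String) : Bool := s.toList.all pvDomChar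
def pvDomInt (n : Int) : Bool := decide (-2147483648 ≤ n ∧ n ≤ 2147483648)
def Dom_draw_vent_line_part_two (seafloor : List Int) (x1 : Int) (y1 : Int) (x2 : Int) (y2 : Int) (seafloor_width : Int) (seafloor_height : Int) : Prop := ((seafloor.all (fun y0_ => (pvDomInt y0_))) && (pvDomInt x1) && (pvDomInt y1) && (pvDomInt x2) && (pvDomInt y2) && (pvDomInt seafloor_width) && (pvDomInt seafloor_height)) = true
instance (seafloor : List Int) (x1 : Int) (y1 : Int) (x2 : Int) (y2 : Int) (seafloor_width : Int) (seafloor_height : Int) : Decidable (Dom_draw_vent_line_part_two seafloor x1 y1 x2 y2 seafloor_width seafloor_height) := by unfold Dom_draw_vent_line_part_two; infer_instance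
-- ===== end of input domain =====

-- B replaces A's in-place pointer walk (part-one delegation plus a while-loop over two running
-- pointers) by tally-then-rebuild: count the line's covered cell indices in a dict, then rebuild the
-- grid in one enumerate pass adding each cell's tally.  The Python A mutates `seafloor` in place and
-- B returns a fresh list; the claim is about the RETURN value only.  A double-increments the pixel
-- of a degenerate (single-point) line; B, by intent, counts it once — see D_ below.

-- ===== PORT A =====
-- seafloor[index] += 1 at index = w*y+x; exact under Pre_ (the assert guarantees 0 ≤ index,
-- Pre_ additionally gives index < length, so .toNat never clamps on admitted inputs)
def pvBump (sf : List Int) (i : Nat) : List Int := sf.set i (sf.getD i 0 + 1)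

def pvUpd (w x y : Int) (sf : List Int) : List Int := pvBump sf (w * y + x).toNat

-- offset(value) = int(value/abs(value)) (sign), 0 for 0
def pvOffset (v : Int) : Int := if v = 0 then 0 else v / |v|

def pvPartOne (sf : List Int) (x1 y1 x2 y2 w : Int) : List Int :=
  if x1 ≠ x2 ∧ y1 ≠ y2 then sf
  else
    let sf1 := if x1 = x2 then
        (PySem.List.pyRange (min y1 y2) (max y1 y2 + 1) 1).foldl (fun s y => pvUpd w x2 y s) sf
      else sf
    if y1 = y2 then
        (PySem.List.pyRange (min x1 x2) (max x1 x2 + 1) 1).foldl (fun s x => pvUpd w x y2 s) sf1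
      else sf1

-- the while-loop; fuel = min(|run|,|rise|) is exactly the number of iterations, so the
-- fuel-exhausted arm is never reached on any call made by the port
def pvLoopA (x2 y2 w ox oy : Int) : Nat → Int → Int → List Int → List Int
  | 0, cx, cy, sf => pvUpd w cx cy sf
  | f+1, cx, cy, sf =>
    if cx ≠ x2 ∧ cy ≠ y2 then pvLoopA x2 y2 w ox oy f (cx + ox) (cy + oy) (pvUpd w cx cy sf)
    else pvUpd w cx cy sf

def draw_vent_line_part_two (seafloor : List Int) (x1 : Int) (y1 : Int) (x2 : Int) (y2 : Int) (seafloor_width : Int) (seafloor_height : Int) : List Int :=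
  if x1 = x2 ∨ y1 = y2 then pvPartOne seafloor x1 y1 x2 y2 seafloor_width
  else
    let rise := y2 - y1
    let run := x2 - x1
    pvLoopA x2 y2 seafloor_width (pvOffset run) (pvOffset rise)
      (min run.natAbs rise.natAbs) x1 y1 seafloor

-- ===== PORT B =====
-- the if/elif/else chain computing (dx, dy, n)
def pvDir (x1 y1 x2 y2 : Int) : Int × Int × Nat :=
  if x1 = x2 then (0, if y1 ≤ y2 then 1 else -1, (y2 - y1).natAbs)
  else if y1 = y2 then ((if x1 ≤ x2 then 1 else -1 : Int), 0, (x2 - x1).natAbs)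
  else ((if x1 < x2 then 1 else -1 : Int), (if y1 < y2 then 1 else -1 : Int),
        min (x2 - x1).natAbs (y2 - y1).natAbs)

def draw_vent_line_part_two_alt (seafloor : List Int) (x1 : Int) (y1 : Int) (x2 : Int) (y2 : Int) (seafloor_width : Int) (seafloor_height : Int) : List Int :=
  match pvDir x1 y1 x2 y2 with
  | (dx, dy, n) =>
    let counts : PySem.Dict Int Int :=
      (PySem.List.pyRange 0 ((n : Int) + 1) 1).foldl
        (fun d i => d.insert (seafloor_width * (y1 + i * dy) + (x1 + i * dx))
          (d.getD (seafloor_width * (y1 + i * dy) + (x1 + i * dx)) 0 + 1)) PySem.Dict.empty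
    (PySem.List.enumerate seafloor).map (fun q => q.2 + counts.getD q.1 0)

-- ===== PRECONDITION & SPEC =====
-- Pre_: exactly the inputs on which A returns (the assert 0 ≤ idx < w*h holds and idx < len at
-- every visited cell).  The cell index is affine in the step parameter, so its extremes over the
-- segment are at the two endpoints; checking them is equivalent and O(1).
def pvEnd (w x1 y1 x2 y2 : Int) : Int :=
  if x1 = x2 then w * y2 + x1
  else if y1 = y2 then w * y1 + x2
  else w * (y1 + ((min (x2 - x1).natAbs (y2 - y1).natAbs : Nat) : Int) * (if y1 < y2 then 1 else -1))
       + (x1 + ((min (x2 - x1).natAbs (y2 - y1).natAbs : Nat) : Int) * (if x1 < x2 then 1 else -1))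

def Pre_draw_vent_line_part_two (seafloor : List Int) (x1 : Int) (y1 : Int) (x2 : Int) (y2 : Int) (seafloor_width : Int) (seafloor_height : Int) : Prop :=
  0 ≤ min (seafloor_width * y1 + x1) (pvEnd seafloor_width x1 y1 x2 y2) ∧
  max (seafloor_width * y1 + x1) (pvEnd seafloor_width x1 y1 x2 y2)
    < min (seafloor_width * seafloor_height) (seafloor.length : Int)
instance (seafloor : List Int) (x1 : Int) (y1 : Int) (x2 : Int) (y2 : Int) (seafloor_width : Int) (seafloor_height : Int) : Decidable (Pre_draw_vent_line_part_two seafloor x1 y1 x2 y2 seafloor_width seafloor_height) := by unfold Pre_draw_vent_line_part_two; infer_instance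

def pvWitness_draw_vent_line_part_two : List Int × Int × Int × Int × Int × Int × Int :=
  ([0, 0, 0, 0, 0, 0], 0, 0, 2, 1, 3, 2)

-- On degenerate lines with x1 = x2 and y1 = y2, A runs both part-one loops and increments the single
-- pixel twice, while B tallies the one covered cell once; a zero-length vent line covers its point
-- exactly once, so B's value is the intended one.
def D_draw_vent_line_part_two (seafloor : List Int) (x1 : Int) (y1 : Int) (x2 : Int) (y2 : Int) (seafloor_width : Int) (seafloor_height : Int) : Prop :=
  x1 = x2 ∧ y1 = y2
instance (seafloor : List Int) (x1 : Int) (y1 : Int) (x2 : Int) (y2 : Int) (seafloor_width : Int) (seafloor_height : Int) : Decidable (D_draw_vent_line_part_two seafloor x1 y1 x2 y2 seafloor_width seafloor_height) := by unfold D_draw_vent_line_part_two; infer_instance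

def Spec_draw_vent_line_part_two (seafloor : List Int) (x1 : Int) (y1 : Int) (x2 : Int) (y2 : Int) (seafloor_width : Int) (seafloor_height : Int) (out : List Int) : Prop := ¬ D_draw_vent_line_part_two seafloor x1 y1 x2 y2 seafloor_width seafloor_height → out = draw_vent_line_part_two_alt seafloor x1 y1 x2 y2 seafloor_width seafloor_height
instance (seafloor : List Int) (x1 : Int) (y1 : Int) (x2 : Int) (y2 : Int) (seafloor_width : Int) (seafloor_height : Int) (out : List Int) : Decidable (Spec_draw_vent_line_part_two seafloor x1 y1 x2 y2 seafloor_width seafloor_height out) := by unfold Spec_draw_vent_line_part_two; infer_instance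

def pvDiffWitness_draw_vent_line_part_two : List Int × Int × Int × Int × Int × Int × Int :=
  ([0], 0, 0, 0, 0, 1, 1)
def pvDiffWitnessOut_draw_vent_line_part_two : (List Int) × (List Int) := ([2], [1])

-- ===== CLAIM (what is proved, stated in full; the proofs are below) =====
def Claim_unchanged_draw_vent_line_part_two : Prop := ∀ (seafloor : List Int) (x1 : Int) (y1 : Int) (x2 : Int) (y2 : Int) (seafloor_width : Int) (seafloor_height : Int), Dom_draw_vent_line_part_two seafloor x1 y1 x2 y2 seafloor_width seafloor_height → Pre_draw_vent_line_part_two seafloor x1 y1 x2 y2 seafloor_width seafloor_height → Spec_draw_vent_line_part_two seafloor x1 y1 x2 y2 seafloor_width seafloor_height (draw_vent_line_part_two seafloor x1 y1 x2 y2 seafloor_width seafloor_height)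
def Claim_changed_draw_vent_line_part_two : Prop := Dom_draw_vent_line_part_two (pvDiffWitness_draw_vent_line_part_two.1) (pvDiffWitness_draw_vent_line_part_two.2.1) (pvDiffWitness_draw_vent_line_part_two.2.2.1) (pvDiffWitness_draw_vent_line_part_two.2.2.2.1) (pvDiffWitness_draw_vent_line_part_two.2.2.2.2.1) (pvDiffWitness_draw_vent_line_part_two.2.2.2.2.2.1) (pvDiffWitness_draw_vent_line_part_two.2.2.2.2.2.2) ∧ Pre_draw_vent_line_part_two (pvDiffWitness_draw_vent_line_part_two.1) (pvDiffWitness_draw_vent_line_part_two.2.1) (pvDiffWitness_draw_vent_line_part_two.2.2.1) (pvDiffWitness_draw_vent_line_part_two.2.2.2.1) (pvDiffWitness_draw_vent_line_part_two.2.2.2.2.1) (pvDiffWitness_draw_vent_line_part_two.2.2.2.2.2.1) (pvDiffWitness_draw_vent_line_part_two.2.2.2.2.2.2) ∧ D_draw_vent_line_part_two (pvDiffWitness_draw_vent_line_part_two.1) (pvDiffWitness_draw_vent_line_part_two.2.1) (pvDiffWitness_draw_vent_line_part_two.2.2.1) (pvDiffWitness_draw_vent_line_part_two.2.2.2.1)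 (pvDiffWitness_draw_vent_line_part_two.2.2.2.2.1) (pvDiffWitness_draw_vent_line_part_two.2.2.2.2.2.1) (pvDiffWitness_draw_vent_line_part_two.2.2.2.2.2.2) ∧ draw_vent_line_part_two (pvDiffWitness_draw_vent_line_part_two.1) (pvDiffWitness_draw_vent_line_part_two.2.1) (pvDiffWitness_draw_vent_line_part_two.2.2.1) (pvDiffWitness_draw_vent_line_part_two.2.2.2.1) (pvDiffWitness_draw_vent_line_part_two.2.2.2.2.1) (pvDiffWitness_draw_vent_line_part_two.2.2.2.2.2.1) (pvDiffWitness_draw_vent_line_part_two.2.2.2.2.2.2) = pvDiffWitnessOut_draw_vent_line_part_two.1 ∧ draw_vent_line_part_two_alt (pvDiffWitness_draw_vent_line_part_two.1) (pvDiffWitness_draw_vent_line_part_two.2.1) (pvDiffWitness_draw_vent_line_part_two.2.2.1) (pvDiffWitness_draw_vent_line_part_two.2.2.2.1) (pvDiffWitness_draw_vent_line_part_two.2.2.2.2.1) (pvDiffWitness_draw_vent_line_part_two.2.2.2.2.2.1) (pvDiffWitness_draw_vent_line_part_two.2.2.2.2.2.2) = pvDiffWitnessOut_draw_vent_line_part_two.2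 ∧ pvDiffWitnessOut_draw_vent_line_part_two.1 ≠ pvDiffWitnessOut_draw_vent_line_part_two.2
def Claim_exact_draw_vent_line_part_two : Prop := ∀ (seafloor : List Int) (x1 : Int) (y1 : Int) (x2 : Int) (y2 : Int) (seafloor_width : Int) (seafloor_height : Int), Dom_draw_vent_line_part_two seafloor x1 y1 x2 y2 seafloor_width seafloor_height → Pre_draw_vent_line_part_two seafloor x1 y1 x2 y2 seafloor_width seafloor_height → D_draw_vent_line_part_two seafloor x1 y1 x2 y2 seafloor_width seafloor_height → draw_vent_line_part_two seafloor x1 y1 x2 y2 seafloor_width seafloor_height ≠ draw_vent_line_part_two_alt seafloor x1 y1 x2 y2 seafloor_width seafloor_height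

-- ===== LEMMAS AND PROOFS =====

theorem pvWitness_ok : Dom_draw_vent_line_part_two (pvWitness_draw_vent_line_part_two.1) (pvWitness_draw_vent_line_part_two.2.1) (pvWitness_draw_vent_line_part_two.2.2.1) (pvWitness_draw_vent_line_part_two.2.2.2.1) (pvWitness_draw_vent_line_part_two.2.2.2.2.1) (pvWitness_draw_vent_line_part_two.2.2.2.2.2.1) (pvWitness_draw_vent_line_part_two.2.2.2.2.2.2) ∧ Pre_draw_vent_line_part_two (pvWitness_draw_vent_line_part_two.1) (pvWitness_draw_vent_line_part_two.2.1) (pvWitness_draw_vent_line_part_two.2.2.1) (pvWitness_draw_vent_line_part_two.2.2.2.1) (pvWitness_draw_vent_line_part_two.2.2.2.2.1) (pvWitness_draw_vent_line_part_two.2.2.2.2.2.1) (pvWitness_draw_vent_line_part_two.2.2.2.2.2.2) := by decide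

-- A's uniform line walk: the fold A's loops amount to (proof-only helper)
def pvUniform (sf : List Int) (x1 y1 dx dy : Int) (n : Nat) (w : Int) : List Int :=
  (PySem.List.pyRange 0 ((n : Int) + 1) 1).foldl
    (fun s i => pvUpd w (x1 + i * dx) (y1 + i * dy) s) sf

theorem pvBump_comm (sf : List Int) (i j : Nat) :
    pvBump (pvBump sf i) j = pvBump (pvBump sf j) i := by
  by_cases h : i = j
  · subst h; rfl
  · simp only [pvBump, List.getD_eq_getElem?_getD, List.getElem?_set_ne h,
      List.getElem?_set_ne (Ne.symm h)]
    exact List.set_comm _ _ h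

theorem pvUpd_comm (w x y x' y' : Int) (sf : List Int) :
    pvUpd w x' y' (pvUpd w x y sf) = pvUpd w x y (pvUpd w x' y' sf) :=
  pvBump_comm sf _ _

theorem pvFoldl_rev_y (w x1 : Int) (l : List Int) (sf : List Int) :
    List.foldl (fun s y => pvUpd w x1 y s) sf l.reverse
      = List.foldl (fun s y => pvUpd w x1 y s) sf l :=
  (List.reverse_perm l).foldl_eq' (fun a _ b _ z => pvUpd_comm w x1 a x1 b z) sf

theorem pvFoldl_rev_x (w y1 : Int) (l : List Int) (sf : List Int) :
    List.foldl (fun s x => pvUpd w x y1 s) sf l.reverse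
      = List.foldl (fun s x => pvUpd w x y1 s) sf l :=
  (List.reverse_perm l).foldl_eq' (fun a _ b _ z => pvUpd_comm w a y1 b y1 z) sf

theorem pvOffset_sign (a b : Int) (h : a ≠ b) :
    pvOffset (b - a) = if a < b then 1 else -1 := by
  rcases lt_or_gt_of_ne h with hlt | hgt
  · have h1 : (0:Int) < b - a := by omega
    rw [pvOffset, if_neg (by omega), abs_of_pos h1, Int.ediv_self (by omega), if_pos hlt]
  · have h1 : b - a < 0 := by omega
    rw [pvOffset, if_neg (by omega), abs_of_neg h1, Int.ediv_neg,
      Int.ediv_self (by omega), if_neg (by omega)]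

theorem pvLoopA_eq (x2 y2 w ox oy : Int) :
    ∀ (n : Nat) (cx cy : Int) (sf : List Int),
      (cx + n * ox = x2 ∨ cy + n * oy = y2) →
      (∀ i : Nat, i < n → cx + i * ox ≠ x2 ∧ cy + i * oy ≠ y2) →
      pvLoopA x2 y2 w ox oy n cx cy sf =
        (List.range (n+1)).foldl
          (fun s (k : Nat) => pvUpd w (cx + (k:Int) * ox) (cy + (k:Int) * oy) s) sf := by
  intro n
  induction n with
  | zero =>
    intro cx cy sf _ _
    simp [pvLoopA, List.range_succ]
  | succ m ih =>
    intro cx cy sf hstop hgo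
    have h0 := hgo 0 (by omega)
    simp only [Nat.cast_zero, zero_mul, add_zero] at h0
    rw [pvLoopA, if_pos h0]
    have hstop' : (cx + ox) + (m:Int) * ox = x2 ∨ (cy + oy) + (m:Int) * oy = y2 := by
      rcases hstop with hc | hc
      · left; push_cast at hc
        have he : ((m:Int) + 1) * ox = (m:Int) * ox + ox := by ring
        rw [he] at hc; linarith
      · right; push_cast at hc
        have he : ((m:Int) + 1) * oy = (m:Int) * oy + oy := by ring
        rw [he] at hc; linarith
    have hgo' : ∀ i : Nat, i < m → (cx + ox) + (i:Int) * ox ≠ x2 ∧ (cy + oy) + (i:Int) * oy ≠ y2 := by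
      intro i hi
      have hg := hgo (i+1) (by omega)
      push_cast at hg
      have he1 : ((i:Int) + 1) * ox = (i:Int) * ox + ox := by ring
      have he2 : ((i:Int) + 1) * oy = (i:Int) * oy + oy := by ring
      rw [he1] at hg; rw [he2] at hg
      constructor
      · intro hc; exact hg.1 (by linarith)
      · intro hc; exact hg.2 (by linarith)
    rw [ih (cx + ox) (cy + oy) _ hstop' hgo']
    rw [List.range_succ_eq_map (n := m+1)]
    simp only [List.foldl_cons, List.foldl_map, Nat.cast_zero, zero_mul, add_zero]
    have hfun : (fun (s : List Int) (k : Nat) => pvUpd w (cx + (↑(k+1)) * ox) (cy + (↑(k+1)) * oy) s)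
        = (fun (s : List Int) (k : Nat) => pvUpd w (cx + ox + ↑k * ox) (cy + oy + ↑k * oy) s) := by
      funext s k
      have e1 : cx + (↑(k+1) : Int) * ox = cx + ox + ↑k * ox := by push_cast; ring
      have e2 : cy + (↑(k+1) : Int) * oy = cy + oy + ↑k * oy := by push_cast; ring
      rw [e1, e2]
    simp only [Nat.succ_eq_add_one] at hfun ⊢
    rw [← hfun]

-- A equals the uniform walk (independently of Pre_) outside the degenerate case
theorem pvA_eq_uniform (sf : List Int) (x1 y1 x2 y2 w h : Int)
    (hnD : ¬ (x1 = x2 ∧ y1 = y2)) :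
    draw_vent_line_part_two sf x1 y1 x2 y2 w h
      = pvUniform sf x1 y1 (pvDir x1 y1 x2 y2).1 (pvDir x1 y1 x2 y2).2.1
          (pvDir x1 y1 x2 y2).2.2 w := by
  by_cases hx : x1 = x2
  · have hy : y1 ≠ y2 := fun hy => hnD ⟨hx, hy⟩
    subst hx
    rw [draw_vent_line_part_two, if_pos (Or.inl rfl)]
    simp only [pvPartOne, pvDir, pvUniform, ne_eq, not_true_eq_false, false_and,
      if_false, if_true, if_neg hy]
    rcases lt_or_gt_of_ne hy with hlt | hgt
    · rw [min_eq_left hlt.le, max_eq_right hlt.le, if_pos hlt.le]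
      rw [PySem.List.pyRange_one, PySem.List.pyRange_one]
      simp only [List.foldl_map, mul_zero, add_zero, mul_one, zero_add, sub_zero]
      have hm : (y2 + 1 - y1).toNat = ((↑(y2 - y1).natAbs : Int) + 1).toNat := by omega
      rw [hm]
    · rw [min_eq_right hgt.le, max_eq_left hgt.le, if_neg (not_le.mpr hgt)]
      have hred : List.foldl (fun s i => pvUpd w (x1 + i * 0) (y1 + i * -1) s) sf
            (PySem.List.pyRange 0 ((↑(y2 - y1).natAbs : Int) + 1) 1)
          = List.foldl (fun s y => pvUpd w x1 y s) sf (PySem.List.pyRange y1 (y2 - 1) (-1)) := by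
        rw [PySem.List.pyRange_neg_one, PySem.List.pyRange_one]
        simp only [List.foldl_map, zero_add, mul_zero, add_zero, mul_neg_one, ← sub_eq_add_neg,
          sub_zero]
        have hm : ((↑(y2 - y1).natAbs : Int) + 1).toNat = (y1 - (y2 - 1)).toNat := by omega
        rw [hm]
      rw [hred, PySem.List.pyRange_neg_one_eq_reverse]
      have hsplit : ((y2:Int) - 1 + 1) = y2 := by ring
      rw [hsplit, pvFoldl_rev_y]
  · by_cases hy : y1 = y2
    · subst hy
      rw [draw_vent_line_part_two, if_pos (Or.inr rfl)]
      simp only [pvPartOne, pvDir, pvUniform, ne_eq, not_true_eq_false, and_false,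
        if_false, if_neg hx, if_true]
      rcases lt_or_gt_of_ne hx with hlt | hgt
      · rw [min_eq_left hlt.le, max_eq_right hlt.le, if_pos hlt.le]
        rw [PySem.List.pyRange_one, PySem.List.pyRange_one]
        simp only [List.foldl_map, mul_zero, add_zero, mul_one, zero_add, sub_zero]
        have hm : (x2 + 1 - x1).toNat = ((↑(x2 - x1).natAbs : Int) + 1).toNat := by omega
        rw [hm]
      · rw [min_eq_right hgt.le, max_eq_left hgt.le, if_neg (not_le.mpr hgt)]
        have hred : List.foldl (fun s i => pvUpd w (x1 + i * -1) (y1 + i * 0) s) sf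
              (PySem.List.pyRange 0 ((↑(x2 - x1).natAbs : Int) + 1) 1)
            = List.foldl (fun s x => pvUpd w x y1 s) sf (PySem.List.pyRange x1 (x2 - 1) (-1)) := by
          rw [PySem.List.pyRange_neg_one, PySem.List.pyRange_one]
          simp only [List.foldl_map, zero_add, mul_zero, add_zero, mul_neg_one, ← sub_eq_add_neg,
            sub_zero]
          have hm : ((↑(x2 - x1).natAbs : Int) + 1).toNat = (x1 - (x2 - 1)).toNat := by omega
          rw [hm]
        rw [hred, PySem.List.pyRange_neg_one_eq_reverse]
        have hsplit : ((x2:Int) - 1 + 1) = x2 := by ring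
        rw [hsplit, pvFoldl_rev_x]
    · -- diagonal
      have hox := pvOffset_sign x1 x2 hx
      have hoy := pvOffset_sign y1 y2 hy
      have hstop : x1 + ((min (x2 - x1).natAbs (y2 - y1).natAbs : Nat) : Int) * (if x1 < x2 then (1:Int) else -1) = x2
          ∨ y1 + ((min (x2 - x1).natAbs (y2 - y1).natAbs : Nat) : Int) * (if y1 < y2 then (1:Int) else -1) = y2 := by
        split_ifs <;> simp only [mul_one, mul_neg_one] <;> omega
      have hgo : ∀ i : Nat, i < min (x2 - x1).natAbs (y2 - y1).natAbs →
          x1 + (i:Int) * (if x1 < x2 then (1:Int) else -1) ≠ x2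
          ∧ y1 + (i:Int) * (if y1 < y2 then (1:Int) else -1) ≠ y2 := by
        intro i hi
        split_ifs <;> simp only [mul_one, mul_neg_one] <;> constructor <;> omega
      rw [draw_vent_line_part_two, if_neg (by tauto)]
      simp only [hox, hoy]
      rw [pvLoopA_eq _ _ w _ _ _ x1 y1 sf hstop hgo]
      simp only [pvDir, pvUniform, if_neg hx, if_neg hy]
      rw [PySem.List.pyRange_one, List.foldl_map]
      simp only [zero_add, sub_zero]
      have hm2 : (((min (x2 - x1).natAbs (y2 - y1).natAbs : Nat) : Int) + 1).toNat
          = min (x2 - x1).natAbs (y2 - y1).natAbs + 1 := by omega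
      rw [hm2]

-- bump addressed by an Int index (clamping toNat never fires under the nonneg hypotheses below)
def pvBumpT (sf : List Int) (t : Int) : List Int := pvBump sf t.toNat

theorem pvBumpT_getElem? (sf : List Int) (t : Int) (j : Nat) :
    (pvBumpT sf t)[j]? = if t.toNat = j then sf[j]?.map (· + 1) else sf[j]? := by
  simp only [pvBumpT, pvBump, List.getElem?_set]
  by_cases hj : t.toNat = j
  · subst hj
    by_cases hl : t.toNat < sf.length
    · simp [hl, List.getD_eq_getElem?_getD]
    · simp [hl]
  · simp [hj]

theorem pvFoldl_bumpT_getElem? (l : List Int) :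
    ∀ (sf : List Int) (j : Nat),
      (l.foldl pvBumpT sf)[j]? = sf[j]?.map (fun v => v + (l.countP (fun t => t.toNat == j) : Int)) := by
  induction l with
  | nil => intro sf j; cases hj : sf[j]? <;> simp [hj]
  | cons t ts ih =>
    intro sf j
    simp only [List.foldl_cons]
    rw [ih, pvBumpT_getElem?]
    by_cases h : t.toNat = j
    · rw [if_pos h]
      cases sf[j]? <;> simp [h] <;> push_cast <;> ring
    · rw [if_neg h]
      cases sf[j]? <;> simp [h]

theorem pvEnumerate_getElem? {α : Type} (sf : List α) :
    ∀ (s : Int) (j : Nat),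
      (PySem.List.enumerate sf s)[j]? = sf[j]?.map (fun v => (s + (j:Int), v)) := by
  induction sf with
  | nil => intro s j; simp [PySem.List.enumerate_nil]
  | cons a tl ih =>
    intro s j
    rw [PySem.List.enumerate_cons]
    cases j with
    | zero => simp
    | succ m =>
      simp only [List.getElem?_cons_succ]
      rw [ih (s + 1) m]
      cases h : tl[m]? with
      | none => simp
      | some v =>
        simp only [Option.map_some, Option.some.injEq, Prod.mk.injEq, and_true]
        push_cast; ring

theorem pvFoldl_bumpT_eq_tally (l : List Int) (sf : List Int) (h : ∀ t ∈ l, 0 ≤ t) :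
    l.foldl pvBumpT sf
      = (PySem.List.enumerate sf).map (fun q => q.2 + (l.count q.1 : Int)) := by
  apply List.ext_getElem?
  intro j
  rw [pvFoldl_bumpT_getElem?, List.getElem?_map, pvEnumerate_getElem?]
  cases hj : sf[j]? with
  | none => simp
  | some v =>
    simp only [Option.map_some, Option.some.injEq, zero_add]
    have hc : l.countP (fun t => t.toNat == j) = l.count ((j:Nat) : Int) := by
      rw [List.count_eq_countP]
      apply List.countP_congr
      intro t ht
      have h0 := h t ht
      simp only [beq_iff_eq]
      omega
    simp [hc]

-- the heart of the equivalence: a uniform walk equals the tally-then-rebuild pass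
theorem pvUniform_eq_alt (sf : List Int) (x1 y1 dx dy w : Int) (n : Nat)
    (h : ∀ i : Int, 0 ≤ i → i < (n : Int) + 1 → 0 ≤ w * (y1 + i * dy) + (x1 + i * dx)) :
    pvUniform sf x1 y1 dx dy n w
      = (PySem.List.enumerate sf).map (fun q => q.2 +
          ((PySem.List.pyRange 0 ((n : Int) + 1) 1).foldl
            (fun d i => d.insert (w * (y1 + i * dy) + (x1 + i * dx))
              (d.getD (w * (y1 + i * dy) + (x1 + i * dx)) 0 + 1)) PySem.Dict.empty).getD q.1 0) := by
  have hL : pvUniform sf x1 y1 dx dy n w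
      = ((PySem.List.pyRange 0 ((n : Int) + 1) 1).map
          (fun i => w * (y1 + i * dy) + (x1 + i * dx))).foldl pvBumpT sf := by
    rw [pvUniform, List.foldl_map]
    rfl
  have hR : ∀ k : Int,
      ((PySem.List.pyRange 0 ((n : Int) + 1) 1).foldl
        (fun d i => d.insert (w * (y1 + i * dy) + (x1 + i * dx))
          (d.getD (w * (y1 + i * dy) + (x1 + i * dx)) 0 + 1)) PySem.Dict.empty).getD k 0
      = (((PySem.List.pyRange 0 ((n : Int) + 1) 1).map
          (fun i => w * (y1 + i * dy) + (x1 + i * dx))).count k : Int) := by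
    intro k
    have h1 : (PySem.List.pyRange 0 ((n : Int) + 1) 1).foldl
        (fun d i => d.insert (w * (y1 + i * dy) + (x1 + i * dx))
          (d.getD (w * (y1 + i * dy) + (x1 + i * dx)) 0 + 1)) (PySem.Dict.empty : PySem.Dict Int Int)
        = ((PySem.List.pyRange 0 ((n : Int) + 1) 1).map
            (fun i => w * (y1 + i * dy) + (x1 + i * dx))).foldl
            (fun d x => d.insert x (d.getD x 0 + 1)) (PySem.Dict.empty : PySem.Dict Int Int) :=
      (List.foldl_map (f := fun i => w * (y1 + i * dy) + (x1 + i * dx))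
        (g := fun (d : PySem.Dict Int Int) (x : Int) => d.insert x (d.getD x 0 + 1))).symm
    rw [h1, PySem.Dict.getD_foldl_insert_add_one, PySem.Dict.getD_empty]
    ring
  rw [hL, pvFoldl_bumpT_eq_tally]
  · simp only [hR]
  · intro t ht
    rcases List.mem_map.mp ht with ⟨i, hi, rfl⟩
    rcases PySem.List.mem_pyRange_one.mp hi with ⟨hi0, hi1⟩
    exact h i hi0 hi1

-- endpoints nonneg + affine index ⇒ every visited index nonneg
theorem pvAffine_nonneg (b s i nI : Int) (h0 : 0 ≤ b) (hn : 0 ≤ b + nI * s)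
    (hi0 : 0 ≤ i) (hi : i ≤ nI) : 0 ≤ b + i * s := by
  rcases le_or_gt 0 s with hs | hs
  · nlinarith
  · nlinarith

-- ===== VERDICT (by name: the statement is the Claim_ definition above) =====
theorem draw_vent_line_part_two_spec : Claim_unchanged_draw_vent_line_part_two := by
  intro sf x1 y1 x2 y2 w h _ hPre hnD
  rw [pvA_eq_uniform sf x1 y1 x2 y2 w h hnD]
  obtain ⟨hmin, _⟩ := hPre
  rw [le_min_iff] at hmin
  by_cases hx : x1 = x2
  · subst hx
    rw [pvEnd, if_pos rfl] at hmin
    have hd : pvDir x1 y1 x1 y2 = (0, if y1 ≤ y2 then 1 else -1, (y2 - y1).natAbs) := by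
      rw [pvDir, if_pos rfl]
    simp only [draw_vent_line_part_two_alt, hd]
    refine pvUniform_eq_alt sf x1 y1 0 (if y1 ≤ y2 then 1 else -1) w ((y2 - y1).natAbs) ?_
    intro i hi0 hi1
    rcases le_or_gt y1 y2 with hle | hlt
    · rw [if_pos hle]
      have h2 := pvAffine_nonneg (w * y1 + x1) w i (y2 - y1) hmin.1
        (by nlinarith [hmin.2]) hi0 (by omega)
      nlinarith [h2]
    · rw [if_neg (not_le.mpr hlt)]
      have h2 := pvAffine_nonneg (w * y1 + x1) (-w) i (y1 - y2) hmin.1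
        (by nlinarith [hmin.2]) hi0 (by omega)
      nlinarith [h2]
  · by_cases hy : y1 = y2
    · subst hy
      rw [pvEnd, if_neg hx, if_pos rfl] at hmin
      have hd : pvDir x1 y1 x2 y1 = ((if x1 ≤ x2 then 1 else -1 : Int), 0, (x2 - x1).natAbs) := by
        rw [pvDir, if_neg hx, if_pos rfl]
      simp only [draw_vent_line_part_two_alt, hd]
      refine pvUniform_eq_alt sf x1 y1 (if x1 ≤ x2 then 1 else -1) 0 w ((x2 - x1).natAbs) ?_
      intro i hi0 hi1
      rcases le_or_gt x1 x2 with hle | hlt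
      · rw [if_pos hle]
        have h2 := pvAffine_nonneg (w * y1 + x1) 1 i (x2 - x1) hmin.1
          (by nlinarith [hmin.2]) hi0 (by omega)
        nlinarith [h2]
      · rw [if_neg (not_le.mpr hlt)]
        have h2 := pvAffine_nonneg (w * y1 + x1) (-1) i (x1 - x2) hmin.1
          (by nlinarith [hmin.2]) hi0 (by omega)
        nlinarith [h2]
    · rw [pvEnd, if_neg hx, if_neg hy] at hmin
      have hd : pvDir x1 y1 x2 y2 = ((if x1 < x2 then 1 else -1 : Int),
          (if y1 < y2 then 1 else -1 : Int), min (x2 - x1).natAbs (y2 - y1).natAbs) := by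
        rw [pvDir, if_neg hx, if_neg hy]
      simp only [draw_vent_line_part_two_alt, hd]
      refine pvUniform_eq_alt sf x1 y1 (if x1 < x2 then 1 else -1) (if y1 < y2 then 1 else -1) w
        (min (x2 - x1).natAbs (y2 - y1).natAbs) ?_
      intro i hi0 hi1
      have h2 := pvAffine_nonneg (w * y1 + x1)
        (w * (if y1 < y2 then 1 else -1) + (if x1 < x2 then 1 else -1)) i
        ((min (x2 - x1).natAbs (y2 - y1).natAbs : Nat) : Int) hmin.1
        (by nlinarith [hmin.2]) hi0 (Int.lt_add_one_iff.mp hi1)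
      nlinarith [h2]

theorem draw_vent_line_part_two_changed : Claim_changed_draw_vent_line_part_two := by
  unfold Claim_changed_draw_vent_line_part_two; decide

theorem draw_vent_line_part_two_tight : Claim_exact_draw_vent_line_part_two := by
  intro sf x1 y1 x2 y2 w h _ hPre hD
  obtain ⟨hxx, hyy⟩ := hD
  subst hxx; subst hyy
  have hpe : pvEnd w x1 y1 x1 y1 = w * y1 + x1 := by simp [pvEnd]
  unfold Pre_draw_vent_line_part_two at hPre
  rw [hpe] at hPre
  simp only [min_self, max_self, le_min_iff, lt_min_iff] at hPre
  obtain ⟨hge, hlen⟩ := hPre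
  set b : Int := w * y1 + x1 with hb
  have hA : draw_vent_line_part_two sf x1 y1 x1 y1 w h = pvBumpT (pvBumpT sf b) b := by
    rw [draw_vent_line_part_two, if_pos (Or.inl rfl)]
    simp only [pvPartOne, ne_eq, not_true_eq_false, false_and, if_false, if_true, min_self,
      max_self, PySem.List.pyRange_one_singleton, List.foldl_cons, List.foldl_nil]
    rfl
  have hB : draw_vent_line_part_two_alt sf x1 y1 x1 y1 w h
      = (PySem.List.enumerate sf).map
          (fun q => q.2 + ((PySem.Dict.empty (κ := Int) (ν := Int)).insert b 1).getD q.1 0) := by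
    have hd : pvDir x1 y1 x1 y1 = (0, 1, 0) := by simp [pvDir]
    simp only [draw_vent_line_part_two_alt, hd]
    have h02 : (PySem.List.pyRange 0 (((0:Nat) : Int) + 1) 1) = [0] := by decide
    rw [h02]
    simp only [List.foldl_cons, List.foldl_nil, mul_zero, add_zero, zero_mul,
      PySem.Dict.getD_empty, zero_add]
    rw [hb]
  rw [hA, hB]
  intro heq
  have hj : b.toNat < sf.length := by omega
  have hval := congrArg (fun l => l[b.toNat]?) heq
  simp only at hval
  rw [pvBumpT_getElem?, pvBumpT_getElem?, if_pos rfl, if_pos rfl,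
    List.getElem?_map, pvEnumerate_getElem?] at hval
  rw [List.getElem?_eq_getElem hj] at hval
  have hbn : (0 : Int) + (b.toNat : Int) = b := by omega
  rw [hbn] at hval
  simp only [Option.map_some, Option.some.injEq, PySem.Dict.getD_insert_self] at hval
  omega
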